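-- pv_equiv track=rewrite | github.com/acaptainb/CSCI-141 | lab07/text_stats.py | printedWords
-- ===== SOURCE A (Python) =====
-- def printedWords(data):
--     """Returns a sorted list of year, total count pairs showing total printed words per year"""
--     a={}
--     for i in data:
--         for j in data[i]:
--             if j not in a:
--                 a[j] = 0
--             a[j]+=data[i][j]
--     words = []
--     for y in a:
--         words.append((y,a[y]))
--     return sorted(words)
-- ===== SOURCE B (Python) =====
-- def printedWords(data):
--     """Returns a sorted list of year, total count pairs showing total printed words per year"""
--     pairs = sorted([p for inner in data.values() for p in inner.items()])
--     out = []
--     i = 0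
--     while i < len(pairs):
--         y, total = pairs[i]
--         i += 1
--         while i < len(pairs) and pairs[i][0] == y:
--             total += pairs[i][1]
--             i += 1
--         out.append((y, total))
--     return out
-- ===== Notes on version B (the rewrite author's own statement) =====
-- stated objective: alternative
-- what changed: B flattens all (year,count) pairs into one list, sorts it once, and sums each consecutive run of equal years in a single sweep, instead of A's dict accumulation followed by sorting the dict's items. (Pre_ only rules out association lists with duplicate keys, which represent no Python dict.)
import Mathlib
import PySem

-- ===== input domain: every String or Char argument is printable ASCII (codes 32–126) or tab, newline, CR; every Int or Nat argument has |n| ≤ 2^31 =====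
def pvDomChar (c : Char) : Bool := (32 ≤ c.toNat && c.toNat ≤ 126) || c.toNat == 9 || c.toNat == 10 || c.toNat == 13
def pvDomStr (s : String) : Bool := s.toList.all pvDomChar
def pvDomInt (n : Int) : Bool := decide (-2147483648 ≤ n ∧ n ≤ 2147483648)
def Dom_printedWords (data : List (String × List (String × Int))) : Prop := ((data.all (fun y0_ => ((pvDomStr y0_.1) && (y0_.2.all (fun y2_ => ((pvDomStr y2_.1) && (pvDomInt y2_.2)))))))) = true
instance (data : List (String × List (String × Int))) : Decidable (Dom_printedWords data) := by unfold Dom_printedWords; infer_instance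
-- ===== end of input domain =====

-- B replaces A's dict-accumulate-then-sort with flatten, sort once, then a single grouping
-- sweep over the sorted pairs (objective: alternative decomposition, same asymptotic cost).


-- ===== PORT A =====
-- `for i in data` iterates the dict's keys in insertion order; `data[i]` is the lookup.
-- Python tuple comparison in `sorted(words)` is lexicographic = the Lex order on String × Int
-- (string comparison is Lean's `<` per PySem).
def printedWords (data : List (String × List (String × Int))) : List (String × Int) :=
  let d : PySem.Dict String (List (String × Int)) := PySem.Dict.mk data
  let a : PySem.Dict String Int :=
    (data.map (fun p => p.1)).foldl (fun a i =>
      ((d.getD i []).map (fun p => p.1)).foldl (fun a j =>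
        let a := if a.contains j then a else a.insert j 0
        a.insert j (a.getD j 0 + (PySem.Dict.mk (d.getD i [])).getD j 0)) a)
      PySem.Dict.empty
  let words := a.keys.foldl (fun w y => w ++ [(y, a.getD y 0)]) []
  PySem.List.sorted words (fun p => toLex p)

-- ===== PORT B =====
-- port of B's while-loops: the inner `while` collecting one run of equal years is the
-- takeWhile/dropWhile split of the remaining sorted pairs.
def pvSweep (l : List (String × Int)) : List (String × Int) :=
  match l with
  | [] => []
  | (y, c) :: rest =>
      (y, c + ((rest.takeWhile (fun p => p.1 == y)).map (fun p => p.2)).sum)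
        :: pvSweep (rest.dropWhile (fun p => p.1 == y))
termination_by l.length
decreasing_by
  simp only [List.length_cons]
  exact Nat.lt_succ_of_le (List.length_dropWhile_le _ _)

def printedWords_alt (data : List (String × List (String × Int))) : List (String × Int) :=
  pvSweep (PySem.List.sorted (data.flatMap (fun p => p.2)) (fun p => toLex p))

-- ===== PRECONDITION & SPEC =====
-- Pre_ excludes association lists with duplicate outer or duplicate inner keys: those do not
-- represent Python dicts (A's parameter and its values are dicts, whose keys are unique), so
-- A's repeated-first-match behaviour on them is an artefact of the encoding.
def Pre_printedWords (data : List (String × List (String × Int))) : Prop :=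
  (data.map (fun p => p.1)).Nodup ∧ ∀ p ∈ data, (p.2.map (fun q => q.1)).Nodup
instance (data : List (String × List (String × Int))) : Decidable (Pre_printedWords data) := by
  unfold Pre_printedWords; infer_instance

def pvWitness_printedWords : (List (String × List (String × Int))) :=
  [("alice", [("1900", 5), ("1901", 3)]), ("bob", [("1900", 2)])]

def Spec_printedWords (data : List (String × List (String × Int))) (out : List (String × Int)) : Prop := out = printedWords_alt data
instance (data : List (String × List (String × Int))) (out : List (String × Int)) : Decidable (Spec_printedWords data out) := by unfold Spec_printedWords; infer_instance

-- ===== CLAIM (what is proved, stated in full; the proofs are below) =====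
def Claim_equal_printedWords : Prop := ∀ (data : List (String × List (String × Int))), Dom_printedWords data → Pre_printedWords data → Spec_printedWords data (printedWords data)

-- ===== LEMMAS AND PROOFS =====

-- the collapsed body of A's inner loop
def pvStep (a : PySem.Dict String Int) (p : String × Int) : PySem.Dict String Int :=
  a.insert p.1 (a.getD p.1 0 + p.2)

-- total count attributed to year y by a list of pairs
def pvSum (l : List (String × Int)) (y : String) : Int :=
  ((l.filter (fun p => p.1 == y)).map (fun p => p.2)).sum

theorem pvGetD_mk_cons_self {ν : Type} (k : String) (v : ν) (t : List (String × ν)) (d0 : ν) :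
    (PySem.Dict.mk ((k, v) :: t)).getD k d0 = v := by
  simp [PySem.Dict.getD, PySem.Dict.get?, List.find?]

theorem pvGetD_mk_cons_ne {ν : Type} (k j : String) (v : ν) (t : List (String × ν)) (d0 : ν)
    (h : j ≠ k) : (PySem.Dict.mk ((k, v) :: t)).getD j d0 = (PySem.Dict.mk t).getD j d0 := by
  simp [PySem.Dict.getD, PySem.Dict.get?, List.find?, (by simpa using h.symm : (k == j) = false)]

-- a fold over a nodup dict's keys that reads each key's value by lookup is the fold over its items
theorem pvLookupFold {ν β : Type} (l : List (String × ν)) (d0 : ν)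
    (g : β → String → ν → β) (a : β) (hnd : (l.map (fun p => p.1)).Nodup) :
    (l.map (fun p => p.1)).foldl (fun a j => g a j ((PySem.Dict.mk l).getD j d0)) a
      = l.foldl (fun a p => g a p.1 p.2) a := by
  induction l generalizing a with
  | nil => rfl
  | cons hd t ih =>
    obtain ⟨k, v⟩ := hd
    simp only [List.map_cons, List.foldl_cons, pvGetD_mk_cons_self]
    rw [PySem.List.foldl_congr_mem (t.map (fun p => p.1))
      (fun a j => g a j ((PySem.Dict.mk ((k, v) :: t)).getD j d0))
      (fun a j => g a j ((PySem.Dict.mk t).getD j d0)) _ ?_]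
    · exact ih _ hnd.of_cons
    · intro acc x hx
      have hne : x ≠ k := by
        intro h; subst h
        exact (List.nodup_cons.mp (by simpa using hnd)).1 hx
      simp only [pvGetD_mk_cons_ne _ _ _ _ _ hne]

theorem pvGetD_of_not_contains (a : PySem.Dict String Int) (j : String)
    (h : a.contains j = false) : a.getD j 0 = 0 := by
  simp only [PySem.Dict.contains, List.any_eq_false] at h
  have : a.items.find? (fun p => p.1 == j) = none :=
    List.find?_eq_none.mpr (fun p hp => h p hp)
  simp [PySem.Dict.getD, PySem.Dict.get?, this]

-- A's guarded two-step update is one insert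
theorem pvStep_eq (a : PySem.Dict String Int) (j : String) (c : Int) :
    ((if a.contains j then a else a.insert j 0).insert j
      ((if a.contains j then a else a.insert j 0).getD j 0 + c)) = pvStep a (j, c) := by
  by_cases h : a.contains j = true
  · simp [h, pvStep]
  · have h' : a.contains j = false := by simpa using h
    rw [h']
    simp only [Bool.false_eq_true, if_false]
    rw [PySem.Dict.getD_insert, if_pos rfl, PySem.Dict.insert_insert_self, pvStep,
      pvGetD_of_not_contains a j h']

theorem pvFold_getD (l : List (String × Int)) (d : PySem.Dict String Int) (y : String) :
    (l.foldl pvStep d).getD y 0 = d.getD y 0 + pvSum l y := by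
  induction l generalizing d with
  | nil => simp [pvSum]
  | cons p t ih =>
    obtain ⟨k, c⟩ := p
    rw [List.foldl_cons]
    show ((t.foldl pvStep (pvStep d (k, c)))).getD y 0 = _
    rw [ih]
    have hstep : (pvStep d (k, c)).getD y 0 = if y = k then d.getD k 0 + c else d.getD y 0 := by
      rw [pvStep, PySem.Dict.getD_insert]
    have hsum : pvSum ((k, c) :: t) y = (if y = k then c else 0) + pvSum t y := by
      unfold pvSum
      by_cases h : y = k
      · subst h; simp [List.filter_cons]
      · have hbe : (k == y) = false := by simpa using fun e => h e.symm
        simp [List.filter_cons, hbe, h]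
    rw [hstep, hsum]
    by_cases h : y = k
    · subst h; simp; ring
    · simp [h]

theorem pvSum_perm {l l' : List (String × Int)} (h : l.Perm l') (y : String) :
    pvSum l y = pvSum l' y := (((h.filter _).map _).sum_eq)

-- sorting pairs with distinct first components sorts by first component
theorem pvSortedMapPairs (S : List String) (g : String → Int) (hS : S.Nodup) :
    PySem.List.sorted (S.map (fun y => (y, g y))) (fun p => toLex p)
      = (PySem.List.sorted S (fun y => y)).map (fun y => (y, g y)) := by
  apply PySem.List.sorted_eq_of_perm_of_pairwise_lt
  · exact (PySem.List.sorted_perm S (fun y => y) false).map _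
  · rw [List.pairwise_map]
    have hpw : List.Pairwise (· ≤ ·) (PySem.List.sorted S (fun y => y) false) :=
      PySem.List.sorted_pairwise S (fun y => y)
    have hnd : (PySem.List.sorted S (fun y => y) false).Nodup :=
      (PySem.List.sorted_perm S (fun y => y) false).nodup_iff.mpr hS
    have hlt : List.Pairwise (· < ·) (PySem.List.sorted S (fun y => y) false) :=
      (hpw.and hnd).imp (fun h => lt_of_le_of_ne h.1 h.2)
    exact hlt.imp (fun h => Prod.Lex.lt_iff.mpr (Or.inl h))

-- the sweep of a key-sorted list groups each run of equal keys into one summed pair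
theorem pvDedup_run (y : String) (m r : List String)
    (hm : ∀ x ∈ m, x = y) (hr : y ∉ r) :
    (y :: (m ++ r)).dedup = y :: r.dedup := by
  induction m with
  | nil => simp [List.dedup_cons_of_notMem, hr]
  | cons x t ih =>
    have hx : x = y := hm x (by simp)
    subst hx
    rw [List.cons_append, List.dedup_cons_of_mem (by simp)]
    exact ih (fun x hx => hm x (by simp [hx]))

-- the sweep of a key-sorted list groups each run of equal keys into one summed pair
theorem pvSweep_sorted (l : List (String × Int))
    (h : List.Pairwise (fun a b : String × Int => a.1 ≤ b.1) l) :
    pvSweep l = (l.map (fun p => p.1)).dedup.map (fun y => (y, pvSum l y)) := by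
  induction l using pvSweep.induct with
  | case1 => simp [pvSweep]
  | case2 y c rest ih =>
    have hcons := List.pairwise_cons.mp h
    have hrest : List.Pairwise (fun a b : String × Int => a.1 ≤ b.1) rest := hcons.2
    have hsame : ∀ p ∈ rest.takeWhile (fun p => p.1 == y), p.1 = y := by
      intro p hp
      exact eq_of_beq (List.mem_takeWhile_imp (p := fun q : String × Int => q.1 == y) hp)
    have hrest' : ∀ p ∈ rest.dropWhile (fun p => p.1 == y), y < p.1 := by
      cases hr : rest.dropWhile (fun p => p.1 == y) with
      | nil => intro p hp; simp at hp
      | cons q t =>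
        have hqfail : (q.1 == y) = false := by
          have hh := List.head?_dropWhile_not (fun p : String × Int => p.1 == y) rest
          rw [hr] at hh
          exact hh
        have hqne : q.1 ≠ y := by simpa using hqfail
        have hqmem : q ∈ rest := (List.dropWhile_sublist _).mem (by rw [hr]; simp)
        have hyq : y < q.1 := lt_of_le_of_ne (hcons.1 q hqmem) hqne.symm
        have hqt : ∀ p ∈ t, q.1 ≤ p.1 := by
          have : List.Pairwise (fun a b : String × Int => a.1 ≤ b.1) (q :: t) := by
            rw [← hr]; exact hrest.sublist (List.dropWhile_sublist _)
          exact (List.pairwise_cons.mp this).1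
        intro p hp
        rcases List.mem_cons.mp hp with e | hp'
        · subst e; exact hyq
        · exact lt_of_lt_of_le hyq (hqt p hp')
    have hsplit : rest.takeWhile (fun p => p.1 == y) ++ rest.dropWhile (fun p => p.1 == y) = rest :=
      List.takeWhile_append_dropWhile
    -- dedup of the key list
    have hkeys : ((y, c) :: rest).map (fun p => p.1)
        = y :: ((rest.takeWhile (fun p => p.1 == y)).map (fun p => p.1)
              ++ (rest.dropWhile (fun p => p.1 == y)).map (fun p => p.1)) := by
      conv_lhs => rw [← hsplit]
      rw [List.map_cons, List.map_append]
    have hdedup : (((y, c) :: rest).map (fun p => p.1)).dedup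
        = y :: ((rest.dropWhile (fun p => p.1 == y)).map (fun p => p.1)).dedup := by
      rw [hkeys]
      apply pvDedup_run
      · intro x hx
        rcases List.mem_map.mp hx with ⟨p, hp, e⟩
        exact e ▸ hsame p hp
      · intro hx
        rcases List.mem_map.mp hx with ⟨p, hp, e⟩
        exact absurd (e ▸ hrest' p hp) (lt_irrefl y)
    -- the head sum
    have hfilter_same : (rest.takeWhile (fun p => p.1 == y)).filter (fun p => p.1 == y)
        = rest.takeWhile (fun p => p.1 == y) :=
      List.filter_eq_self.mpr (fun p hp => by simp [hsame p hp])
    have hfilter_rest' : (rest.dropWhile (fun p => p.1 == y)).filter (fun p => p.1 == y) = [] :=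
      List.filter_eq_nil_iff.mpr (fun p hp => by simp [ne_of_gt (hrest' p hp)])
    have hsumhead : pvSum ((y, c) :: rest) y
        = c + ((rest.takeWhile (fun p => p.1 == y)).map (fun p => p.2)).sum := by
      unfold pvSum
      rw [← hsplit, List.filter_cons, List.filter_append, hfilter_same, hfilter_rest']
      simp
    -- sums of the later years ignore the removed run
    have hsumtail : ∀ y' ∈ ((rest.dropWhile (fun p => p.1 == y)).map (fun p => p.1)).dedup,
        pvSum ((y, c) :: rest) y' = pvSum (rest.dropWhile (fun p => p.1 == y)) y' := by
      intro y' hy'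
      rcases List.mem_map.mp (List.mem_dedup.mp hy') with ⟨q, hq, e⟩
      have hyne : y ≠ y' := e ▸ ne_of_lt (hrest' q hq)
      unfold pvSum
      rw [← hsplit, List.filter_cons, List.filter_append]
      have h1 : ((y : String) == y') = false := by simpa using hyne
      have h2 : (rest.takeWhile (fun p => p.1 == y)).filter (fun p => p.1 == y') = [] :=
        List.filter_eq_nil_iff.mpr (fun p hp => by simp [hsame p hp, hyne])
      simp [h1, h2]
    -- assemble
    rw [pvSweep, hdedup, List.map_cons, ih (hrest.sublist (List.dropWhile_sublist _))]
    refine congrArg₂ (· :: ·) ?_ ?_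
    · rw [hsumhead]
    · refine List.map_congr_left ?_
      intro y' hy'
      exact congrArg (Prod.mk y') (hsumtail y' hy').symm

theorem pvEmpty_getD (y : String) : (PySem.Dict.empty : PySem.Dict String Int).getD y 0 = 0 := by
  simp [PySem.Dict.getD, PySem.Dict.get?, PySem.Dict.empty]

-- ===== VERDICT (by name: the statement is the Claim_ definition above) =====
theorem printedWords_spec : Claim_equal_printedWords := by
  intro data _hdom hpre
  obtain ⟨hnodup, hinner⟩ := hpre
  unfold Spec_printedWords printedWords printedWords_alt
  simp only []
  -- A's two lookup-driven loops are the single fold of pvStep over the flattened pairs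
  have houter :
      (data.map (fun p => p.1)).foldl (fun a i =>
        (((PySem.Dict.mk data).getD i []).map (fun p => p.1)).foldl (fun a j =>
          (if a.contains j then a else a.insert j 0).insert j
            ((if a.contains j then a else a.insert j 0).getD j 0 +
              (PySem.Dict.mk ((PySem.Dict.mk data).getD i [])).getD j 0)) a)
        PySem.Dict.empty
      = (data.flatMap (fun p => p.2)).foldl pvStep PySem.Dict.empty := by
    rw [pvLookupFold data [] (fun a i v =>
        (v.map (fun p => p.1)).foldl (fun a j =>
          (if a.contains j then a else a.insert j 0).insert j
            ((if a.contains j then a else a.insert j 0).getD j 0 +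
              (PySem.Dict.mk v).getD j 0)) a) PySem.Dict.empty hnodup]
    rw [List.foldl_flatMap]
    refine PySem.List.foldl_congr_mem data _ _ _ ?_
    intro acc p hp
    rw [pvLookupFold p.2 0 (fun a j cv =>
        (if a.contains j then a else a.insert j 0).insert j
          ((if a.contains j then a else a.insert j 0).getD j 0 + cv)) acc (hinner p hp)]
    refine PySem.List.foldl_congr_mem p.2 _ pvStep acc ?_
    intro acc q _
    obtain ⟨qj, qc⟩ := q
    exact pvStep_eq acc qj qc
  rw [houter]
  set A := (data.flatMap (fun p => p.2)).foldl pvStep PySem.Dict.empty with hA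
  have hks : A.keys = PySem.Set.ofList ((data.flatMap (fun p => p.2)).map (fun p => p.1)) := by
    rw [hA]
    show ((data.flatMap (fun p => p.2)).foldl
        (fun d p => d.insert p.1 (d.getD p.1 0 + p.2)) PySem.Dict.empty).keys = _
    rw [PySem.Dict.keys_foldl_insert_key (data.flatMap (fun p => p.2)) (fun p => p.1)
      (fun d p => d.getD p.1 0 + p.2) PySem.Dict.empty]
    rfl
  have hgd : ∀ y, A.getD y 0 = pvSum (data.flatMap (fun p => p.2)) y := by
    intro y
    rw [hA, pvFold_getD, pvEmpty_getD, zero_add]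
  rw [PySem.List.foldl_append_singleton_eq_map (fun y => (y, A.getD y 0)) A.keys [],
    List.nil_append, hks,
    show (fun y => (y, A.getD y 0)) = (fun y => (y, pvSum (data.flatMap (fun p => p.2)) y)) from
      funext (fun y => by rw [hgd y]),
    pvSortedMapPairs _ _ (PySem.Set.nodup_ofList _)]
  -- B's side: the sorted flat list is key-sorted, so the sweep groups it
  have hperm := PySem.List.sorted_perm (data.flatMap (fun p => p.2))
    (fun p => (toLex p : Lex (String × Int))) false
  have hpw2 : List.Pairwise (fun a b : String × Int => a.1 ≤ b.1)
      (PySem.List.sorted (data.flatMap (fun p => p.2)) (fun p => (toLex p : Lex (String × Int)))) := by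
    refine (PySem.List.sorted_pairwise (data.flatMap (fun p => p.2))
      (fun p => (toLex p : Lex (String × Int)))).imp ?_
    intro a b h
    rcases Prod.Lex.le_iff.mp h with h1 | ⟨h1, _⟩
    · exact le_of_lt h1
    · exact le_of_eq h1
  rw [pvSweep_sorted _ hpw2,
    show (fun y => (y, pvSum (PySem.List.sorted (data.flatMap (fun p => p.2))
        (fun p => (toLex p : Lex (String × Int)))) y))
      = (fun y => (y, pvSum (data.flatMap (fun p => p.2)) y)) from
      funext (fun y => by rw [pvSum_perm hperm y])]
  congr 1
  apply PySem.List.sorted_eq_of_perm_of_pairwise_lt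
  · rw [List.perm_ext_iff_of_nodup (List.nodup_dedup _) (PySem.Set.nodup_ofList _)]
    intro a
    rw [List.mem_dedup, PySem.Set.mem_ofList]
    exact (hperm.map (fun p => p.1)).mem_iff
  · have hle : List.Pairwise (· ≤ ·)
        ((PySem.List.sorted (data.flatMap (fun p => p.2))
          (fun p => (toLex p : Lex (String × Int)))).map (fun p => p.1)) :=
      List.pairwise_map.mpr hpw2
    have hle' := hle.sublist (List.dedup_sublist _)
    exact (hle'.and (List.nodup_dedup _)).imp (fun h => lt_of_le_of_ne h.1 h.2)
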